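-- pv_equiv track=rewrite | github.com/Hardrick98/TheCompleteRobots | robotoid.py | get_kinematic_chains
-- ===== SOURCE A (Python) =====
-- def get_kinematic_chains(end_effectors, parent_child):
--         """
--         Returns:
--             A list of kinematic chains
--         """
--         chains = []
--         for ee in end_effectors:
--             chain = []
--             chain.append(ee)
--             parent = parent_child[ee]
--             while parent != "root":
--                 chain.append(parent)
--                 ee = parent
--                 parent = parent_child[ee]
--             chains.append(chain[::-1])
--
--         return chains
-- ===== SOURCE B (Python) =====
-- def get_kinematic_chains(end_effectors, parent_child):
--     """
--     Returns:
--         A list of kinematic chains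
--     """
--     memo = {}  # node -> full root-to-node chain, shared across end effectors
--     chains = []
--     for ee in end_effectors:
--         # phase 1: walk up until a memoized ancestor or the root
--         path = []
--         node = ee
--         while True:
--             if node in memo:
--                 base = memo[node]
--                 break
--             parent = parent_child[node]
--             path.append(node)
--             if parent == "root":
--                 base = []
--                 break
--             node = parent
--         # phase 2: fill the memo back down, extending the base chain
--         chain = base
--         for n in reversed(path):
--             chain = chain + [n]
--             memo[n] = chain
--         chains.append(chain)
--     return chains
-- ===== Notes on version B (the rewrite author's own statement) =====
-- stated objective: alternative
-- what changed: B replaces A's independent walk of every chain (re-walking shared ancestors for each end effector) by a memo table of root-to-node chains: each end effector walks up only to the nearest already-memoized ancestor or the root, then fills the memo back down while extending the base chain.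
import Mathlib
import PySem

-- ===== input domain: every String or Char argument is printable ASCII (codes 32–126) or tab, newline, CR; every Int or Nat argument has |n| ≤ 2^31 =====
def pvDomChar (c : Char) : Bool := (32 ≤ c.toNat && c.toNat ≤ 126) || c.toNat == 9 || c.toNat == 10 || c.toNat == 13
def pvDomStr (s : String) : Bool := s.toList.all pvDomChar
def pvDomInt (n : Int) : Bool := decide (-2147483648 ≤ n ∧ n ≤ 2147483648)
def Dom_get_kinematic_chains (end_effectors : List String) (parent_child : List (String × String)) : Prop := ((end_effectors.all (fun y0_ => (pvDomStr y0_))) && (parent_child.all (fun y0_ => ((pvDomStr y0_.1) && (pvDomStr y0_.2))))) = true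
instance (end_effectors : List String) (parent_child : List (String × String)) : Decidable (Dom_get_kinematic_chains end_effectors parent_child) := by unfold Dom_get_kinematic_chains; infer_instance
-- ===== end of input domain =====

-- B replaces A's independent re-walk of every chain by a shared memo table: each end effector
-- walks up only to the nearest already-known ancestor, then the memo is filled back down
-- (objective: alternative — shares ancestor prefixes instead of re-walking them).

-- ===== PORT A =====
-- the while-loop of A: state (parent, chain); fuel only makes the loop total (a cycle never
-- terminates in Python and is excluded by Pre_)
def pvKCLoop (pc : List (String × String)) : Nat → String → List String → List String
  | 0, _, chain => chain
  | f+1, parent, chain =>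
    if parent ≠ "root" then
      let chain := chain ++ [parent]
      match List.lookup parent pc with
      | some p => pvKCLoop pc f p chain
      | none => chain      -- KeyError in Python; outside Pre_
    else chain

def get_kinematic_chains (end_effectors : List String) (parent_child : List (String × String)) : List (List String) :=
  end_effectors.foldl (fun chains ee =>
    match List.lookup ee parent_child with
    | some parent => chains ++ [(pvKCLoop parent_child (parent_child.length + 1) parent [ee]).reverse]
    | none => chains       -- KeyError in Python; outside Pre_
  ) []

-- ===== PORT B =====
-- phase 1 of B: walk up from node until a memoized ancestor or the root, collecting path
def pvKCWalkUp (pc : List (String × String)) : Nat → PySem.Dict String (List String) → String → List String → (List String × List String)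
  | 0, _, _, path => (path, [])       -- fuel exhausted (cycle); outside Pre_
  | f+1, memo, node, path =>
    match memo.get? node with
    | some base => (path, base)
    | none =>
      match List.lookup node pc with
      | none => (path, [])            -- KeyError in Python; outside Pre_
      | some parent =>
        let path := path ++ [node]
        if parent = "root" then (path, [])
        else pvKCWalkUp pc f memo parent path

-- phase 2 of B: fill the memo back down the collected path, extending the base chain
def pvKCFill (memo : PySem.Dict String (List String)) (base : List String) (path : List String) :
    PySem.Dict String (List String) × List String :=
  path.reverse.foldl (fun st n =>
    let chain := st.2 ++ [n]
    (st.1.insert n chain, chain)) (memo, base)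

def get_kinematic_chains_alt (end_effectors : List String) (parent_child : List (String × String)) : List (List String) :=
  (end_effectors.foldl (fun (st : PySem.Dict String (List String) × List (List String)) ee =>
     let w := pvKCWalkUp parent_child (parent_child.length + 1) st.1 ee []
     let r := pvKCFill st.1 w.2 w.1
     (r.1, st.2 ++ [r.2])) (PySem.Dict.empty, [])).2

-- ===== PRECONDITION & SPEC =====
-- the n-th ancestor of a node under the parent map (None if a key is missing)
def pvAncestor (pc : List (String × String)) : Nat → String → Option String
  | 0, s => some s
  | n+1, s => (List.lookup s pc).bind (pvAncestor pc n)

-- Pre_ excludes exactly the inputs where A does not return: an end effector whose parent walk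
-- hits a missing key (KeyError) or a cycle (Python loops forever).
def Pre_get_kinematic_chains (end_effectors : List String) (parent_child : List (String × String)) : Prop :=
  ∀ ee ∈ end_effectors, ∃ n < parent_child.length + 1, pvAncestor parent_child (n+1) ee = some "root"

instance (end_effectors : List String) (parent_child : List (String × String)) : Decidable (Pre_get_kinematic_chains end_effectors parent_child) := by
  unfold Pre_get_kinematic_chains; infer_instance

def pvWitness_get_kinematic_chains : List String × (List (String × String)) :=
  (["a", "b"], [("a", "root"), ("b", "a")])

def Spec_get_kinematic_chains (end_effectors : List String) (parent_child : List (String × String)) (out : List (List String)) : Prop := out = get_kinematic_chains_alt end_effectors parent_child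
instance (end_effectors : List String) (parent_child : List (String × String)) (out : List (List String)) : Decidable (Spec_get_kinematic_chains end_effectors parent_child out) := by unfold Spec_get_kinematic_chains; infer_instance

-- ===== CLAIM (what is proved, stated in full; the proofs are below) =====
def Claim_equal_get_kinematic_chains : Prop := ∀ (end_effectors : List String) (parent_child : List (String × String)), Dom_get_kinematic_chains end_effectors parent_child → Pre_get_kinematic_chains end_effectors parent_child → Spec_get_kinematic_chains end_effectors parent_child (get_kinematic_chains end_effectors parent_child)

-- ===== LEMMAS AND PROOFS =====

-- boolean root-reachability within f lookups (proof-side form of Pre_)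
def pvKCReach (pc : List (String × String)) : Nat → String → Bool
  | 0, _ => false
  | f+1, s =>
    match List.lookup s pc with
    | none => false
    | some p => p == "root" || pvKCReach pc f p

theorem pvAncestor_reach (pc : List (String × String)) :
    ∀ (n : Nat) (s : String), pvAncestor pc (n+1) s = some "root" → pvKCReach pc (n+1) s = true := by
  intro n
  induction n with
  | zero =>
    intro s h
    simp only [pvAncestor] at h
    cases hp : List.lookup s pc with
    | none => rw [hp] at h; simp at h
    | some p =>
      rw [hp] at h
      simp only [Option.bind_some] at h
      simp only [pvKCReach, hp]
      simp [Option.some.inj h]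
  | succ n ih =>
    intro s h
    simp only [pvAncestor] at h
    cases hp : List.lookup s pc with
    | none => rw [hp] at h; simp at h
    | some p =>
      rw [hp] at h
      simp only [Option.bind_some] at h
      simp only [pvKCReach, hp, Bool.or_eq_true, beq_iff_eq]
      exact Or.inr (ih p h)

theorem pvKCReach_succ (pc : List (String × String)) :
    ∀ (f : Nat) (s : String), pvKCReach pc f s = true → pvKCReach pc (f+1) s = true := by
  intro f
  induction f with
  | zero => intro s h; simp [pvKCReach] at h
  | succ f ih =>
    intro s h
    rw [pvKCReach] at h
    rw [pvKCReach]
    cases hp : List.lookup s pc with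
    | none => rw [hp] at h; simp at h
    | some p =>
      rw [hp] at h
      simp only [Bool.or_eq_true, beq_iff_eq] at h ⊢
      rcases h with h | h
      · exact Or.inl h
      · exact Or.inr (ih p h)

theorem pvKCReach_mono (pc : List (String × String)) (f f' : Nat) (s : String)
    (hle : f ≤ f') (h : pvKCReach pc f s = true) : pvKCReach pc f' s = true := by
  induction hle with
  | refl => exact h
  | step _ ih => exact pvKCReach_succ pc _ s ih

theorem pvPre_reach (pc : List (String × String)) (ee : String)
    (h : ∃ n < pc.length + 1, pvAncestor pc (n+1) ee = some "root") :
    pvKCReach pc (pc.length + 1) ee = true := by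
  rcases h with ⟨n, hn, h⟩
  exact pvKCReach_mono pc (n+1) (pc.length + 1) ee (by omega) (pvAncestor_reach pc n ee h)

-- the parent-to-root walk from a PARENT p, as a pure partial function: the nodes from p upward,
-- node-first, stopping below "root"; `none` = missing key or not enough fuel
def pvTail (pc : List (String × String)) : Nat → String → Option (List String)
  | 0, p => if p = "root" then some [] else none
  | f+1, p =>
    if p = "root" then some []
    else (List.lookup p pc).bind (fun q => (pvTail pc f q).map (p :: ·))

theorem pvTail_root (pc : List (String × String)) (f : Nat) : pvTail pc f "root" = some [] := by
  cases f <;> simp [pvTail]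

theorem pvTail_succ (pc : List (String × String)) :
    ∀ (f : Nat) (p : String) (t : List String), pvTail pc f p = some t → pvTail pc (f+1) p = some t := by
  intro f
  induction f with
  | zero =>
    intro p t h
    by_cases hp : p = "root"
    · subst hp; rw [pvTail_root] at h; rw [pvTail_root]; exact h
    · simp [pvTail, hp] at h
  | succ f ih =>
    intro p t h
    by_cases hp : p = "root"
    · subst hp; rw [pvTail_root] at h; rw [pvTail_root]; exact h
    · rw [pvTail, if_neg hp] at h
      rw [pvTail, if_neg hp]
      cases hq : List.lookup p pc with
      | none => rw [hq] at h; simp at h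
      | some q =>
        rw [hq] at h
        simp only [Option.bind_some] at h ⊢
        cases ht : pvTail pc f q with
        | none => rw [ht] at h; simp at h
        | some t' =>
          rw [ht] at h
          rw [ih q t' ht]
          exact h

theorem pvTail_mono (pc : List (String × String)) (f f' : Nat) (p : String) (t : List String)
    (hle : f ≤ f') (h : pvTail pc f p = some t) : pvTail pc f' p = some t := by
  induction hle with
  | refl => exact h
  | step _ ih => exact pvTail_succ pc _ p t ih

theorem pvTail_unique (pc : List (String × String)) (f f' : Nat) (p : String) (t t' : List String)
    (h : pvTail pc f p = some t) (h' : pvTail pc f' p = some t') : t = t' := by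
  rcases Nat.le_total f f' with hle | hle
  · have := pvTail_mono pc f f' p t hle h
    rw [this] at h'; exact Option.some.inj h'
  · have := pvTail_mono pc f' f p t' hle h'
    rw [this] at h; exact (Option.some.inj h).symm

theorem pvReach_tail (pc : List (String × String)) :
    ∀ (f : Nat) (s : String), pvKCReach pc (f+1) s = true →
      ∃ p t, List.lookup s pc = some p ∧ pvTail pc f p = some t := by
  intro f
  induction f with
  | zero =>
    intro s h
    simp only [pvKCReach] at h
    cases hp : List.lookup s pc with
    | none => simp [hp] at h
    | some p =>
      simp only [hp, Bool.or_eq_true, beq_iff_eq] at h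
      rcases h with h | h
      · exact ⟨p, [], rfl, by simp [h, pvTail]⟩
      · exact absurd h (by simp)
  | succ f ih =>
    intro s h
    simp only [pvKCReach] at h
    cases hp : List.lookup s pc with
    | none => simp [hp] at h
    | some p =>
      simp only [hp, Bool.or_eq_true, beq_iff_eq] at h
      rcases h with h | h
      · exact ⟨p, [], rfl, by simp [h, pvTail_root]⟩
      · rcases ih p h with ⟨q, t', hq, ht'⟩
        by_cases hp' : p = "root"
        · exact ⟨p, [], rfl, by simp [hp', pvTail_root]⟩
        · refine ⟨p, p :: t', rfl, ?_⟩
          rw [pvTail, if_neg hp', hq]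
          simp [ht']

theorem pvKCLoop_eq (pc : List (String × String)) :
    ∀ (f : Nat) (p : String) (t acc : List String), pvTail pc f p = some t →
      pvKCLoop pc f p acc = acc ++ t := by
  intro f
  induction f with
  | zero =>
    intro p t acc h
    simp only [pvTail] at h
    by_cases hp : p = "root" <;> simp [hp] at h
    simp [pvKCLoop, ← h]
  | succ f ih =>
    intro p t acc h
    by_cases hp : p = "root"
    · subst hp
      rw [pvTail_root] at h
      cases Option.some.inj h
      simp [pvKCLoop]
    · rw [pvTail, if_neg hp] at h
      cases hq : List.lookup p pc with
      | none => rw [hq] at h; simp at h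
      | some q =>
        rw [hq] at h
        simp only [Option.bind_some] at h
        cases ht : pvTail pc f q with
        | none => rw [ht] at h; simp at h
        | some t' =>
          rw [ht] at h
          simp only [Option.map_some] at h
          cases Option.some.inj h
          simp only [pvKCLoop, hq]
          rw [if_pos hp]
          rw [ih q t' (acc ++ [p]) ht]
          simp

-- every chain stored in the memo is the true root-to-node chain
def pvMemoOK (pc : List (String × String)) (memo : PySem.Dict String (List String)) : Prop :=
  ∀ s c, memo.get? s = some c →
    ∃ p f t, List.lookup s pc = some p ∧ pvTail pc f p = some t ∧ c = t.reverse ++ [s]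

-- each node on an upward path, with the chain the fill phase will assign it
def pvFillOK (pc : List (String × String)) (base : List String) (q : List String) : Prop :=
  ∀ (i : Nat) (h : i < q.length),
    ∃ p f t, List.lookup q[i] pc = some p ∧ pvTail pc f p = some t ∧
      base ++ (q.drop i).reverse = t.reverse ++ [q[i]]

theorem pvKCWalkUp_eq (pc : List (String × String)) (memo : PySem.Dict String (List String))
    (hm : pvMemoOK pc memo) :
    ∀ (f : Nat) (s p : String) (t path : List String),
      List.lookup s pc = some p → pvTail pc f p = some t →
      ∃ q base, pvKCWalkUp pc (f+1) memo s path = (path ++ q, base) ∧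
        base ++ q.reverse = t.reverse ++ [s] ∧ pvFillOK pc base q := by
  intro f
  induction f with
  | zero =>
    intro s p t path hs ht
    by_cases hp : p = "root"
    case neg => simp [pvTail, hp] at ht
    subst hp
    rw [pvTail_root] at ht
    cases Option.some.inj ht
    cases hmem : memo.get? s with
    | some base =>
      rcases hm s base hmem with ⟨p₀, f₀, t₀, hp₀, ht₀, hc₀⟩
      rw [hs] at hp₀
      cases Option.some.inj hp₀
      have ht00 : t₀ = [] := by rw [pvTail_root] at ht₀; exact (Option.some.inj ht₀).symm
      subst ht00
      refine ⟨[], base, ?_, by simpa using hc₀, fun i hi => by simp at hi⟩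
      rw [pvKCWalkUp]; simp [hmem]
    | none =>
      refine ⟨[s], [], ?_, by simp, ?_⟩
      · rw [pvKCWalkUp]; simp [hmem, hs]
      · intro i hi
        simp only [List.length_cons, List.length_nil] at hi
        interval_cases i
        exact ⟨"root", 0, [], by simpa using hs, pvTail_root pc 0, by simp⟩
  | succ f ih =>
    intro s p t path hs ht
    cases hmem : memo.get? s with
    | some base =>
      rcases hm s base hmem with ⟨p₀, f₀, t₀, hp₀, ht₀, hc₀⟩
      rw [hs] at hp₀
      cases Option.some.inj hp₀
      have htt : t₀ = t := pvTail_unique pc f₀ (f+1) p t₀ t ht₀ ht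
      subst htt
      refine ⟨[], base, ?_, by simpa using hc₀, fun i hi => by simp at hi⟩
      rw [pvKCWalkUp]; simp [hmem]
    | none =>
      by_cases hp : p = "root"
      · subst hp
        rw [pvTail_root] at ht
        cases Option.some.inj ht
        refine ⟨[s], [], ?_, by simp, ?_⟩
        · rw [pvKCWalkUp]; simp [hmem, hs]
        · intro i hi
          simp only [List.length_cons, List.length_nil] at hi
          interval_cases i
          exact ⟨"root", 0, [], by simpa using hs, pvTail_root pc 0, by simp⟩
      · rw [pvTail, if_neg hp] at ht
        cases hq : List.lookup p pc with
        | none => rw [hq] at ht; simp at ht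
        | some q₂ =>
          rw [hq] at ht
          simp only [Option.bind_some] at ht
          cases ht₂ : pvTail pc f q₂ with
          | none => rw [ht₂] at ht; simp at ht
          | some t₂ =>
            rw [ht₂] at ht
            simp only [Option.map_some] at ht
            cases Option.some.inj ht
            rcases ih p q₂ t₂ (path ++ [s]) hq ht₂ with ⟨q₃, base, hrun, hbase, hfill⟩
            refine ⟨s :: q₃, base, ?_, ?_, ?_⟩
            · rw [pvKCWalkUp]
              simp only [hmem, hs]
              rw [if_neg hp, hrun]
              simp
            · rw [List.reverse_cons, ← List.append_assoc, hbase, List.reverse_cons]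
            · intro i hi
              cases i with
              | zero =>
                refine ⟨p, f + 1, p :: t₂, by simpa using hs, ?_, ?_⟩
                · rw [pvTail, if_neg hp, hq]
                  simp [ht₂]
                · simp only [List.drop_zero]
                  rw [List.reverse_cons, ← List.append_assoc, hbase, List.reverse_cons]
                  simp
              | succ j =>
                have hj : j < q₃.length := by simpa using hi
                rcases hfill j hj with ⟨p', f', t', h1, h2, h3⟩
                exact ⟨p', f', t', by simpa using h1, h2, by simpa using h3⟩

theorem pvFillOK_tail (pc : List (String × String)) (base : List String) (s : String) (q : List String)
    (h : pvFillOK pc base (s :: q)) : pvFillOK pc base q := by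
  intro i hi
  rcases h (i+1) (by simpa using hi) with ⟨p, f, t, h1, h2, h3⟩
  exact ⟨p, f, t, by simpa using h1, h2, by simpa using h3⟩

theorem pvKCFill_eq (pc : List (String × String)) :
    ∀ (q : List String) (base : List String) (memo : PySem.Dict String (List String)),
      pvMemoOK pc memo → pvFillOK pc base q →
      (pvKCFill memo base q).2 = base ++ q.reverse ∧ pvMemoOK pc (pvKCFill memo base q).1 := by
  intro q
  induction q with
  | nil => intro base memo hm _; exact ⟨by simp [pvKCFill], by simpa [pvKCFill] using hm⟩
  | cons s q₃ ih =>
    intro base memo hm hf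
    have hstep : pvKCFill memo base (s :: q₃) =
        ((pvKCFill memo base q₃).1.insert s ((pvKCFill memo base q₃).2 ++ [s]),
         (pvKCFill memo base q₃).2 ++ [s]) := by
      simp [pvKCFill, List.foldl_append]
    rcases ih base memo hm (pvFillOK_tail pc base s q₃ hf) with ⟨h2, hm'⟩
    constructor
    · rw [hstep]; simp [h2]
    · rw [hstep]
      intro s' c hc
      simp only at hc
      rw [PySem.Dict.get?_insert] at hc
      by_cases hss : s' = s
      · subst hss
        rw [if_pos rfl] at hc
        rcases hf 0 (by simp) with ⟨p, f, t, h1, hT, h3⟩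
        refine ⟨p, f, t, by simpa using h1, hT, ?_⟩
        rw [← Option.some.inj hc, h2]
        simpa using h3
      · rw [if_neg hss] at hc
        exact hm' s' c hc

theorem pvKC_fold (pc : List (String × String)) :
    ∀ (ees : List String) (memo : PySem.Dict String (List String)) (acc : List (List String)),
      pvMemoOK pc memo →
      (∀ ee ∈ ees, pvKCReach pc (pc.length + 1) ee = true) →
      ees.foldl (fun chains ee =>
        match List.lookup ee pc with
        | some parent => chains ++ [(pvKCLoop pc (pc.length + 1) parent [ee]).reverse]
        | none => chains) acc =
      (ees.foldl (fun (st : PySem.Dict String (List String) × List (List String)) ee =>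
        let w := pvKCWalkUp pc (pc.length + 1) st.1 ee []
        let r := pvKCFill st.1 w.2 w.1
        (r.1, st.2 ++ [r.2])) (memo, acc)).2 := by
  intro ees
  induction ees with
  | nil => intro memo acc _ _; rfl
  | cons ee rest ih =>
    intro memo acc hm hpre
    have hee := hpre ee (by simp)
    rcases pvReach_tail pc pc.length ee hee with ⟨p, t, hp, ht⟩
    have ht1 : pvTail pc (pc.length + 1) p = some t := pvTail_succ pc pc.length p t ht
    rcases pvKCWalkUp_eq pc memo hm pc.length ee p t [] hp ht with ⟨q, base, hrun, hbase, hfill⟩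
    rcases pvKCFill_eq pc q base memo hm hfill with ⟨hfe, hmo⟩
    simp only [List.foldl_cons, hp]
    rw [pvKCLoop_eq pc (pc.length + 1) p t [ee] ht1]
    rw [show pvKCWalkUp pc (pc.length + 1) memo ee [] = (q, base) by simpa using hrun]
    simp only
    rw [ih _ _ hmo (fun x hx => hpre x (by simp [hx]))]
    congr 2
    rw [hfe, hbase]
    simp

-- ===== VERDICT (by name: the statement is the Claim_ definition above) =====
theorem get_kinematic_chains_spec : Claim_equal_get_kinematic_chains := by
  intro ees pc _ hpre
  unfold Spec_get_kinematic_chains get_kinematic_chains get_kinematic_chains_alt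
  exact pvKC_fold pc ees PySem.Dict.empty [] (fun s c hc => by simp [PySem.Dict.get?_empty] at hc)
    (fun ee hee => pvPre_reach pc ee (hpre ee hee))
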